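-- pv_equiv track=rewrite | github.com/tmcamps/Nepal_US | analysis/Reverberation_analysis/air_analysis.py | count_elements_neighboring
-- ===== SOURCE A (Python) =====
-- def count_elements_neighboring(indices):
--     """
--     count number of elements in list and number of neighboring elements
--     """
--
--     neighbors = 0
--     if len(indices) > 0:
--         indices = sorted(indices)
--         for i in range(len(indices) - 1):
--             if indices[i + 1] == indices[i] + 1:
--                 neighbors += 1
--
--     return len(indices), neighbors
-- ===== SOURCE B (Python) =====
-- def count_elements_neighboring(indices):
--     """
--     count number of elements in list and number of neighboring elements
--     """
--     s = set(indices)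
--     neighbors = sum(1 for v in s if v + 1 in s)
--     return len(indices), neighbors
-- ===== Notes on version B (the rewrite author's own statement) =====
-- stated objective: simpler
-- what changed: Replaces sorting plus an index loop over adjacent pairs by a set: each distinct value whose successor is in the set contributes exactly one adjacent consecutive pair of the sorted list, so neighbors = |{v in set(indices) : v+1 in set(indices)}| with no sort.
import Mathlib
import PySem

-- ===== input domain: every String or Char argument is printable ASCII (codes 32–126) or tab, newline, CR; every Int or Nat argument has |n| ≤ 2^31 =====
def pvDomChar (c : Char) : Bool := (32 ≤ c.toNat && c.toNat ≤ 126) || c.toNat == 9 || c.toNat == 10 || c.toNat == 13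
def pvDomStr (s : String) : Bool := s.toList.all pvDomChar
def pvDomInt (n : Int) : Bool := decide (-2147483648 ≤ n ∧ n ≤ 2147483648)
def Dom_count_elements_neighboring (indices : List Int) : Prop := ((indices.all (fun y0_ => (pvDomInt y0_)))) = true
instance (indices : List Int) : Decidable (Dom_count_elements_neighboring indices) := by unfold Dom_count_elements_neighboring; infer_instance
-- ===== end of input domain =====

-- B replaces A's sort + adjacent-index loop by a set: count the distinct values whose successor also occurs (simpler, no sorting).

-- ===== PORT A =====
-- pyGetD with default 0 is exact here: the loop indices i and i+1 always lie within range.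
def count_elements_neighboring (indices : List Int) : Int × Int :=
  let neighbors : Int := 0
  if PySem.List.len indices > 0 then
    let indices := PySem.List.sorted indices (fun x => x) false
    let neighbors := (PySem.List.pyRange 0 (PySem.List.len indices - 1) 1).foldl
      (fun acc i =>
        if PySem.List.pyGetD indices (i + 1) 0 = PySem.List.pyGetD indices i 0 + 1
        then acc + 1 else acc) neighbors
    (PySem.List.len indices, neighbors)
  else (PySem.List.len indices, neighbors)

-- ===== PORT B =====
-- sum(1 for v in s if v+1 in s) is the number of elements of the set satisfying the test (order-independent): countP
def count_elements_neighboring_alt (indices : List Int) : Int × Int :=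
  let s : PySem.Set Int := PySem.Set.ofList indices
  let neighbors : Int := (s.countP (fun v => PySem.Set.contains s (v + 1)) : Nat)
  (PySem.List.len indices, neighbors)

-- ===== PRECONDITION & SPEC =====
def Spec_count_elements_neighboring (indices : List Int) (out : Int × Int) : Prop := out = count_elements_neighboring_alt indices
instance (indices : List Int) (out : Int × Int) : Decidable (Spec_count_elements_neighboring indices out) := by unfold Spec_count_elements_neighboring; infer_instance

-- ===== CLAIM (what is proved, stated in full; the proofs are below) =====
def Claim_equal_count_elements_neighboring : Prop := ∀ (indices : List Int), Dom_count_elements_neighboring indices → Spec_count_elements_neighboring indices (count_elements_neighboring indices)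

-- ===== LEMMAS AND PROOFS =====

-- number of adjacent consecutive pairs: A's loop, as structural recursion
def pairCount : List Int → Int
  | a :: b :: t => (if b = a + 1 then 1 else 0) + pairCount (b :: t)
  | _ => 0

-- canonical value of B's neighbor count: distinct values whose successor occurs
def nbr (l : List Int) : Nat := (l.toFinset.filter (fun v => v + 1 ∈ l)).card

theorem foldl_nat_pairCount (s : List Int) (init : Int) :
    (List.range (s.length - 1)).foldl
      (fun acc k => if s.getD (k + 1) 0 = s.getD k 0 + 1 then acc + 1 else acc) init
    = init + pairCount s := by
  induction s generalizing init with
  | nil => simp [pairCount]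
  | cons a t ih =>
    cases t with
    | nil => simp [pairCount]
    | cons b t' =>
      have hl : (a :: b :: t').length - 1 = t'.length + 1 := by simp
      rw [hl, List.range_succ_eq_map, List.foldl_cons, List.foldl_map]
      simp only [List.getD_cons_succ, List.getD_cons_zero]
      have h2 := ih (if b = a + 1 then init + 1 else init)
      simp only [List.length_cons, Nat.add_sub_cancel, List.getD_cons_succ] at h2
      rw [h2]
      simp [pairCount]
      split_ifs <;> ring

theorem foldl_pairCount (s : List Int) (init : Int) :
    (PySem.List.pyRange 0 (PySem.List.len s - 1) 1).foldl
      (fun acc i =>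
        if PySem.List.pyGetD s (i + 1) 0 = PySem.List.pyGetD s i 0 + 1
        then acc + 1 else acc) init
    = init + pairCount s := by
  rw [PySem.List.pyRange_one, List.foldl_map]
  have hb : ∀ (acc : Int) (k : Nat),
      (if PySem.List.pyGetD s ((0 + (k:Int)) + 1) 0 = PySem.List.pyGetD s (0 + (k:Int)) 0 + 1 then acc + 1 else acc)
      = (if s.getD (k+1) 0 = s.getD k 0 + 1 then acc + 1 else acc) := by
    intro acc k
    have h1 : ((0:Int) + (k:Int)) + 1 = (((k+1 : Nat)) : Int) := by push_cast; ring
    have h2 : ((0:Int) + (k:Int)) = ((k : Nat) : Int) := by norm_num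
    rw [h1, h2, PySem.List.pyGetD_natCast, PySem.List.pyGetD_natCast]
  simp only [hb]
  have hT : (PySem.List.len s - 1 - 0).toNat = s.length - 1 := by
    simp [PySem.List.len_eq]
  rw [hT]
  exact foldl_nat_pairCount s init

theorem pairCount_sorted (s : List Int) (h : s.Pairwise (· ≤ ·)) :
    pairCount s = (nbr s : Int) := by
  induction s with
  | nil => simp [pairCount, nbr]
  | cons a t ih =>
    cases t with
    | nil =>
      simp [pairCount, nbr, Finset.filter_singleton]
    | cons b t' =>
      have hab : a ≤ b := (List.pairwise_cons.mp h).1 b (by simp)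
      have htail : (b :: t').Pairwise (· ≤ ·) := (List.pairwise_cons.mp h).2
      have hble : ∀ x ∈ b :: t', b ≤ x := by
        intro x hx
        rcases List.mem_cons.mp hx with rfl | hx
        · exact le_refl x
        · exact (List.pairwise_cons.mp htail).1 x hx
      have ihv : pairCount (b :: t') = (nbr (b :: t') : Int) := ih htail
      by_cases hef : a = b
      · subst hef
        have hnbr : nbr (a :: a :: t') = nbr (a :: t') := by
          unfold nbr
          have hfs : (a :: a :: t').toFinset = (a :: t').toFinset := by simp
          rw [hfs]
          apply congrArg
          apply Finset.filter_congr
          intro x _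
          simp
        rw [show pairCount (a :: a :: t') = (if a = a + 1 then 1 else 0) + pairCount (a :: t') from rfl]
        rw [if_neg (by omega), hnbr, ih htail]
        ring
      · have halt : a < b := lt_of_le_of_ne hab hef
        have hanotT : a ∉ (b :: t').toFinset := by
          simp only [List.mem_toFinset]
          intro hmem
          exact absurd (hble a hmem) (by omega)
        have hQa : (a + 1 ∈ a :: b :: t') ↔ b = a + 1 := by
          constructor
          · intro hm
            rcases List.mem_cons.mp hm with h1 | hm
            · omega
            · have := hble _ hm; omega
          · intro hb1; simp [hb1]
        have hfc : ((b :: t').toFinset.filter (fun v => v + 1 ∈ a :: b :: t'))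
            = ((b :: t').toFinset.filter (fun v => v + 1 ∈ b :: t')) := by
          apply Finset.filter_congr
          intro x hx
          have hbx : b ≤ x := hble x (List.mem_toFinset.mp hx)
          simp only [List.mem_cons]
          constructor
          · rintro (h1 | h1 | h1)
            · omega
            · exact Or.inl h1
            · exact Or.inr h1
          · rintro (h1 | h1)
            · exact Or.inr (Or.inl h1)
            · exact Or.inr (Or.inr h1)
        have hnbr : nbr (a :: b :: t') = (if b = a + 1 then 1 else 0) + nbr (b :: t') := by
          unfold nbr
          rw [List.toFinset_cons, Finset.filter_insert]
          by_cases hcase : b = a + 1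
          · rw [if_pos (by simpa [hQa] using hcase)]
            rw [Finset.card_insert_of_notMem (by
              intro hmem
              exact hanotT (Finset.mem_of_mem_filter a hmem))]
            rw [if_pos hcase, hfc]
            omega
          · rw [if_neg (by simpa [hQa] using hcase), if_neg hcase, hfc]
            simp
        rw [show pairCount (a :: b :: t') = (if b = a + 1 then 1 else 0) + pairCount (b :: t') from rfl]
        rw [ihv, hnbr]
        push_cast
        split_ifs <;> ring

theorem nbr_perm_mem (l m : List Int) (hp : l.Perm m) : nbr l = nbr m := by
  unfold nbr
  rw [List.toFinset_eq_of_perm l m hp]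
  apply congrArg
  apply Finset.filter_congr
  intro x _
  simp [hp.mem_iff]

theorem countP_ofList_eq_nbr (l : List Int) :
    (PySem.Set.ofList l).countP (fun v => PySem.Set.contains (PySem.Set.ofList l) (v + 1)) = nbr l := by
  rw [List.countP_eq_length_filter]
  have hnd : ((PySem.Set.ofList l).filter (fun v => PySem.Set.contains (PySem.Set.ofList l) (v + 1))).Nodup :=
    (PySem.Set.nodup_ofList l).filter _
  rw [← List.toFinset_card_of_nodup hnd]
  unfold nbr
  apply congrArg
  rw [List.toFinset_filter]
  ext x
  simp only [Finset.mem_filter, List.mem_toFinset, PySem.Set.mem_ofList]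
  constructor
  · rintro ⟨hx, hc⟩
    exact ⟨hx, by simpa [PySem.Set.mem_ofList] using (PySem.Set.contains_iff _ _).mp hc⟩
  · rintro ⟨hx, hc⟩
    exact ⟨hx, (PySem.Set.contains_iff _ _).mpr (by simpa [PySem.Set.mem_ofList] using hc)⟩

-- ===== VERDICT (by name: the statement is the Claim_ definition above) =====
theorem count_elements_neighboring_spec : Claim_equal_count_elements_neighboring := by
  intro indices _
  unfold Spec_count_elements_neighboring count_elements_neighboring count_elements_neighboring_alt
  by_cases hne : PySem.List.len indices > 0
  · rw [if_pos hne]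
    refine Prod.ext ?_ ?_
    · simp [PySem.List.len_eq, PySem.List.length_sorted]
    · show (PySem.List.pyRange 0 (PySem.List.len (PySem.List.sorted indices (fun x => x) false) - 1) 1).foldl _ 0 = _
      rw [foldl_pairCount, zero_add]
      have hpw : (PySem.List.sorted indices (fun x => x) false).Pairwise (· ≤ ·) :=
        PySem.List.sorted_pairwise indices (fun x => x)
      rw [pairCount_sorted _ hpw,
        nbr_perm_mem _ indices (PySem.List.sorted_perm indices (fun x => x) false),
        ← countP_ofList_eq_nbr]
  · rw [if_neg hne]
    have h0 : indices = [] := by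
      cases indices with
      | nil => rfl
      | cons a t => exact absurd (by simp [PySem.List.len_eq] : PySem.List.len (a :: t) > 0) hne
    subst h0
    rfl
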